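-- pv_equiv track=rewrite | github.com/siyuliu3/pyDIMA | utils.py | decToBi
-- ===== SOURCE A (Python) =====
-- def decToBi(n,B):
--     n_copy = n
--     binary = list()
--     while n_copy!=0:
--         binary.append(n_copy %2)
--         n_copy = n_copy // 2
--     while len(binary)<B:
--         binary.append(0)
--     return binary[::-1]
-- ===== SOURCE B (Python) =====
-- def decToBi(n, B):
--     L = max(B, n.bit_length())
--     return [(n >> i) & 1 for i in reversed(range(L))]
-- ===== Notes on version B (the rewrite author's own statement) =====
-- stated objective: simpler
-- what changed: Replaced the LSB-first divide-by-2 accumulation plus a separate zero-padding loop plus a final reversal by a single MSB-first comprehension that computes the width L = max(B, n.bit_length()) up front and reads each bit by position with (n >> i) & 1.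
import Mathlib
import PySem

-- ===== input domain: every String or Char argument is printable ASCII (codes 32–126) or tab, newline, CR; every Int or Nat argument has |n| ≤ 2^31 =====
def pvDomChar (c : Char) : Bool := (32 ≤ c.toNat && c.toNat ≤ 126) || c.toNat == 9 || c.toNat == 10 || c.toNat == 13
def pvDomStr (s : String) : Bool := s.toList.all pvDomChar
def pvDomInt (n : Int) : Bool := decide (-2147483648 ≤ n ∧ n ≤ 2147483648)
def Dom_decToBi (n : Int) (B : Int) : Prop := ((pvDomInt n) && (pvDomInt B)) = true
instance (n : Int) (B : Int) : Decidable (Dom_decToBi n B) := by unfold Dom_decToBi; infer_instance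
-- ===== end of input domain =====

-- B computes the width up front and reads bits by position, replacing A's LSB-first
-- accumulation + padding loop + reversal; return-value equivalence proved for n ≥ 0
-- (A's while-loop never terminates for negative n).

-- ===== PORT A =====
-- `while n_copy != 0: binary.append(n_copy % 2); n_copy = n_copy // 2`
-- For negative m Python's loop never terminates (excluded by Pre_), so the
-- recursion is guarded by `m ≤ 0`, which coincides with `m == 0` on 0 ≤ m.
def decToBiDigits (m : Int) : List Int :=
  if h : m ≤ 0 then []
  else PySem.Int.mod m 2 :: decToBiDigits (PySem.Int.floordiv m 2)
termination_by m.toNat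
decreasing_by
  have h2 : PySem.Int.floordiv m 2 = m / 2 := PySem.Int.floordiv_eq_ediv_of_pos (by omega)
  rw [h2]; omega

-- `while len(binary) < B: binary.append(0)`
def decToBiPad (l : List Int) (B : Int) : List Int :=
  if h : (l.length : Int) < B then decToBiPad (l ++ [0]) B else l
termination_by (B - l.length).toNat
decreasing_by simp; omega

def decToBi (n : Int) (B : Int) : List Int :=
  (decToBiPad (decToBiDigits n) B).reverse

-- ===== PORT B =====
-- L = max(B, n.bit_length()); [(n >> i) & 1 for i in reversed(range(L))]
-- (i ranges over 0 ≤ i < L, so `i.toNat` is exact for Python's `n >> i`)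
def decToBi_alt (n : Int) (B : Int) : List Int :=
  ((PySem.List.pyRange 0 (max B (PySem.Int.bitLength n : Int)) 1).reverse).map
    (fun i => PySem.Int.band (n >>> i.toNat) 1)

-- ===== PRECONDITION & SPEC =====
-- Pre_ excludes negative n, on which A's first while-loop never terminates (n_copy // 2 stays negative).
def Pre_decToBi (n : Int) (B : Int) : Prop := 0 ≤ n
instance (n : Int) (B : Int) : Decidable (Pre_decToBi n B) := by unfold Pre_decToBi; infer_instance
def pvWitness_decToBi : Int × Int := (13, 8)
def Spec_decToBi (n : Int) (B : Int) (out : List Int) : Prop := out = decToBi_alt n B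
instance (n : Int) (B : Int) (out : List Int) : Decidable (Spec_decToBi n B out) := by unfold Spec_decToBi; infer_instance

-- ===== CLAIM (what is proved, stated in full; the proofs are below) =====
def Claim_equal_decToBi : Prop := ∀ (n : Int) (B : Int), Dom_decToBi n B → Pre_decToBi n B → Spec_decToBi n B (decToBi n B)

-- ===== LEMMAS AND PROOFS =====

-- the bit-reading function of B
def pvBit (n : Int) (i : Nat) : Int := PySem.Int.band (n >>> i) 1

lemma pvBit_zero (n : Int) (h : 0 < n) : pvBit n 0 = PySem.Int.mod n 2 := by
  simp [pvBit, PySem.Int.band_one]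

lemma pvBit_succ (n : Int) (h : 0 < n) (i : Nat) :
    pvBit n (i + 1) = pvBit (PySem.Int.floordiv n 2) i := by
  have h2 : PySem.Int.floordiv n 2 = n / 2 := PySem.Int.floordiv_eq_ediv_of_pos (by omega)
  have h3 : n >>> (1:Nat) = n / 2 := by rw [Int.shiftRight_eq_div_pow]; norm_num
  have h4 : n >>> (i + 1) = (n >>> (1:Nat)) >>> i := by
    rw [Nat.add_comm, Int.shiftRight_add]
  rw [pvBit, pvBit, h4, h3, h2]

lemma pvBit_high (n : Int) (hn : 0 ≤ n) (i : Nat) (hi : PySem.Int.bitLength n ≤ i) :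
    pvBit n i = 0 := by
  have h1 : n.natAbs < 2 ^ PySem.Int.bitLength n := PySem.Int.lt_two_pow_bitLength n
  have h2 : n < (2 ^ i : Nat) := by
    have : (2:Nat) ^ PySem.Int.bitLength n ≤ 2 ^ i := Nat.pow_le_pow_right (by omega) hi
    omega
  have hz : n >>> i = 0 := by
    rw [Int.shiftRight_eq_div_pow]
    exact Int.ediv_eq_zero_of_lt hn h2
  rw [pvBit, hz]
  decide

-- A's digit loop produces the bits of n, LSB first
lemma decToBiDigits_eq (n : Int) (hn : 0 ≤ n) :
    decToBiDigits n = (List.range (PySem.Int.bitLength n)).map (pvBit n) := by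
  by_cases h0 : n = 0
  · subst h0
    rw [decToBiDigits]
    simp [PySem.Int.bitLength_zero]
  · have hpos : 0 < n := by omega
    rw [decToBiDigits]
    have hfd : 0 ≤ PySem.Int.floordiv n 2 := by
      rw [PySem.Int.floordiv_eq_ediv_of_pos (by omega)]; omega
    rw [dif_neg (by omega)]
    rw [decToBiDigits_eq (PySem.Int.floordiv n 2) hfd]
    rw [PySem.Int.bitLength_of_pos hpos, List.range_succ_eq_map]
    simp only [List.map_cons, List.map_map]
    congr 1
    · exact (pvBit_zero n hpos).symm
    · apply List.map_congr_left
      intro i _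
      simp only [Function.comp]
      exact (pvBit_succ n hpos i).symm
termination_by n.toNat
decreasing_by
  have h2 : PySem.Int.floordiv n 2 = n / 2 := PySem.Int.floordiv_eq_ediv_of_pos (by omega)
  rw [h2]; omega

-- A's padding loop appends exactly (B - len).toNat zeros
lemma decToBiPad_eq (l : List Int) (B : Int) :
    decToBiPad l B = l ++ List.replicate ((B - l.length).toNat) 0 := by
  rw [decToBiPad]
  by_cases h : (l.length : Int) < B
  · rw [dif_pos h, decToBiPad_eq (l ++ [0]) B]
    have : (B - l.length).toNat = ((B - (l ++ [0]).length).toNat) + 1 := by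
      simp; omega
    rw [this, List.replicate_succ, List.append_assoc]
    simp
  · rw [dif_neg h]
    have : (B - l.length).toNat = 0 := by omega
    simp [this]
termination_by (B - l.length).toNat
decreasing_by simp; omega

theorem decToBi_eq_alt (n : Int) (B : Int) (hn : 0 ≤ n) :
    decToBi n B = decToBi_alt n B := by
  set s := PySem.Int.bitLength n with hs
  set p := (B - s).toNat with hp
  -- A side
  have hA : decToBi n B =
      List.replicate p 0 ++ ((List.range s).map (pvBit n)).reverse := by
    rw [decToBi, decToBiDigits_eq n hn, decToBiPad_eq, List.reverse_append,
       List.reverse_replicate]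
    simp only [List.length_map, List.length_range, hp, hs]
  -- B side
  have hL : max B (s : Int) = ((s + p : Nat) : Int) := by
    simp [hp]; omega
  have hB : decToBi_alt n B =
      (List.range (s + p)).reverse.map (pvBit n) := by
    rw [decToBi_alt, ← hs, hL, PySem.List.pyRange_zero_natCast]
    rw [← List.map_reverse, List.map_map]
    apply List.map_congr_left
    intro i _
    simp only [Function.comp_apply, Int.toNat_natCast, Int.shiftRight_natCast_right, pvBit]
  rw [hA, hB, List.range_add, List.reverse_append, List.map_append]
  congr 1
  · -- high bits are all zero
    rw [List.map_reverse, List.map_map]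
    have hmem : ∀ x ∈ (List.range p).map (pvBit n ∘ fun k => s + k), x = (0:Int) := by
      intro x hx
      simp only [List.mem_map] at hx
      obtain ⟨k, _, rfl⟩ := hx
      exact pvBit_high n hn (s + k) (by omega)
    have := List.eq_replicate_of_mem hmem
    simp only [List.length_map, List.length_range] at this
    rw [this]
    simp
  · rw [List.map_reverse]

-- ===== VERDICT (by name: the statement is the Claim_ definition above) =====
theorem decToBi_spec : Claim_equal_decToBi := by
  intro n B _ hpre
  exact decToBi_eq_alt n B hpre
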